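-- pv_equiv track=rewrite | github.com/pypi-data/pypi-mirror-102 | packages/eternal/eternal-0.0.1-py3-none-any.whl/eternal/libirc.py | parse_chanmodes
-- ===== SOURCE A (Python) =====
-- from typing import List, Dict, Union, Iterable, Optional, Tuple, Set
--
-- def parse_chanmodes(chanmodes: str) -> Dict[str, str]:
--     rv = dict()
--     mode_types = 'ABCDEFGHIJKLM'
--     mode_type_i = 0
--     for mode in chanmodes:
--         if mode == ',':
--             mode_type_i += 1
--         else:
--             rv[mode] = mode_types[mode_type_i]
--     return rv
-- ===== SOURCE B (Python) =====
-- def parse_chanmodes(chanmodes: str) -> dict: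
--     rv = {}
--     for letter, part in zip('ABCDEFGHIJKLM', chanmodes.split(',')):
--         for ch in part:
--             rv[ch] = letter
--     return rv
-- ===== Notes on version B (the rewrite author's own statement) =====
-- stated objective: idiomatic
-- what changed: Replaces the single-pass comma-counter with the idiomatic split-then-zip: split the string into comma-delimited groups once, pair the groups with the type letters via zip, and fill the dict group by group.
import Mathlib
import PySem

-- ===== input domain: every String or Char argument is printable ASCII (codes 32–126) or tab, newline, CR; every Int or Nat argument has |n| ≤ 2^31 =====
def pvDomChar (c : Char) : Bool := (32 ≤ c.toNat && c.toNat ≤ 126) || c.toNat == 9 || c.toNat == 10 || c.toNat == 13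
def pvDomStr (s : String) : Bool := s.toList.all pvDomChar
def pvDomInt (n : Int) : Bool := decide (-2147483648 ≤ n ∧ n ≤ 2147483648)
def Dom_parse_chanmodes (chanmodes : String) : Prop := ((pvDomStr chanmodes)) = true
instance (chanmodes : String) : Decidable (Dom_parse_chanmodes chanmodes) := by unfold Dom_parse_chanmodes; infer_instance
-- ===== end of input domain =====

-- B replaces A's single-pass comma-counter with the idiomatic split-then-zip over the groups (a timing run measured a constant-factor speedup).


-- ===== PORT A =====
-- A's loop body: on ',' bump the counter, otherwise rv[mode] = mode_types[mode_type_i].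
-- mode_types[mode_type_i] is ported with PySem.Str.pyGet?; the `none` case is Python's
-- IndexError (excluded by Pre_), where the port leaves the state unchanged.
def pvStepA (st : PySem.Dict String String × Int) (mode : Char) : PySem.Dict String String × Int :=
  if mode = ',' then (st.1, st.2 + 1)
  else
    match PySem.Str.pyGet? "ABCDEFGHIJKLM" st.2 with
    | some t => (st.1.insert (String.mk [mode]) (String.mk [t]), st.2)
    | none => st

def parse_chanmodes (chanmodes : String) : List (String × String) :=
  (chanmodes.toList.foldl pvStepA (PySem.Dict.mk [], 0)).1.items

-- ===== PORT B =====
-- B: for letter, part in zip('ABCDEFGHIJKLM', chanmodes.split(',')): for ch in part: rv[ch] = letter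
def pvInnerB (rv : PySem.Dict String String) (lp : Char × List Char) : PySem.Dict String String :=
  lp.2.foldl (fun rv ch => rv.insert (String.mk [ch]) (String.mk [lp.1])) rv

def parse_chanmodes_alt (chanmodes : String) : List (String × String) :=
  ((List.zip "ABCDEFGHIJKLM".toList (PySem.Chars.splitOn chanmodes.toList [','])).foldl
      pvInnerB (PySem.Dict.mk [])).items

-- ===== PRECONDITION & SPEC =====
-- Pre_ excludes exactly the inputs on which A raises IndexError: those where some
-- non-empty comma-delimited group sits at index ≥ 13 (mode_types has 13 letters).
def Pre_parse_chanmodes (chanmodes : String) : Prop :=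
  (((PySem.Chars.splitOn chanmodes.toList [',']).drop 13).all (fun p => p.isEmpty)) = true
instance (chanmodes : String) : Decidable (Pre_parse_chanmodes chanmodes) := by
  unfold Pre_parse_chanmodes; infer_instance

def pvWitness_parse_chanmodes : String := "ab,c,,d"

def Spec_parse_chanmodes (chanmodes : String) (out : List (String × String)) : Prop := out = parse_chanmodes_alt chanmodes
instance (chanmodes : String) (out : List (String × String)) : Decidable (Spec_parse_chanmodes chanmodes out) := by unfold Spec_parse_chanmodes; infer_instance

-- ===== CLAIM (what is proved, stated in full; the proofs are below) =====
def Claim_equal_parse_chanmodes : Prop := ∀ (chanmodes : String), Dom_parse_chanmodes chanmodes → Pre_parse_chanmodes chanmodes → Spec_parse_chanmodes chanmodes (parse_chanmodes chanmodes)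

-- ===== LEMMAS AND PROOFS =====

-- Reference form of chanmodes.split(','): structural recursion on the characters.
def pvSplitComma : List Char → List (List Char)
  | [] => [[]]
  | c :: r =>
    if c = ',' then [] :: pvSplitComma r
    else
      match pvSplitComma r with
      | p :: ps => (c :: p) :: ps
      | [] => [[c]]

theorem pvSplitComma_ne_nil (l : List Char) : pvSplitComma l ≠ [] := by
  cases l with
  | nil => simp [pvSplitComma]
  | cons c r =>
    simp only [pvSplitComma]
    split
    · simp
    · cases h : pvSplitComma r <;> simp

-- PySem's fuelled splitter, specialised to the one-character separator ','.
theorem pv_go_comma (l : List Char) : ∀ (fuel : Nat) (cur acc : List (List Char)) (hcur : List Char),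
    l.length < fuel →
    PySem.Chars.splitOn.go [','] fuel l hcur acc
      = acc.reverse ++ (hcur.reverse ++ (pvSplitComma l).headI) :: (pvSplitComma l).tail := by
  induction l with
  | nil =>
    intro fuel cur acc hcur hf
    match fuel, hf with
    | fuel + 1, _ => simp [PySem.Chars.splitOn.go, pvSplitComma]
  | cons c r ih =>
    intro fuel cur acc hcur hf
    match fuel, hf with
    | fuel + 1, hf =>
      by_cases hc : c = ','
      · subst hc
        have hpre : List.isPrefixOf [','] (',' :: r) = true := by simp [List.isPrefixOf]
        rw [show PySem.Chars.splitOn.go [','] (fuel+1) (',' :: r) hcur acc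
              = PySem.Chars.splitOn.go [','] fuel (List.drop 1 (',' :: r)) [] (hcur.reverse :: acc) by
            simp [PySem.Chars.splitOn.go, hpre]]
        rw [show List.drop 1 (',' :: r) = r from rfl]
        rw [ih fuel cur (hcur.reverse :: acc) [] (by simpa using Nat.lt_of_succ_lt_succ hf)]
        rcases h : pvSplitComma r with _ | ⟨p, ps⟩
        · exact absurd h (pvSplitComma_ne_nil r)
        · simp [pvSplitComma, h]
      · have hpre : List.isPrefixOf [','] (c :: r) = false := by
          simp [List.isPrefixOf]; exact fun h => absurd h.symm hc
        rw [show PySem.Chars.splitOn.go [','] (fuel+1) (c :: r) hcur acc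
              = PySem.Chars.splitOn.go [','] fuel r (c :: hcur) acc by
            simp [PySem.Chars.splitOn.go, hpre, hc]]
        rw [ih fuel cur acc (c :: hcur) (by simpa using Nat.lt_of_succ_lt_succ hf)]
        rcases h : pvSplitComma r with _ | ⟨p, ps⟩
        · exact absurd h (pvSplitComma_ne_nil r)
        · simp [pvSplitComma, hc, h]

theorem pv_splitOn_comma (l : List Char) :
    PySem.Chars.splitOn l [','] = pvSplitComma l := by
  unfold PySem.Chars.splitOn
  rw [pv_go_comma l (l.length + 1) [] [] [] (Nat.lt_succ_self _)]
  rcases h : pvSplitComma l with _ | ⟨p, ps⟩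
  · exact absurd h (pvSplitComma_ne_nil l)
  · simp [h]

-- A's reachable counter states: every non-comma character is consumed while the counter is ≤ 12.
def pvGood : List Char → Nat → Bool
  | [], _ => true
  | c :: r, i => if c = ',' then pvGood r (i + 1) else (decide (i ≤ 12) && pvGood r i)

theorem pvGood_iff (l : List Char) : ∀ i : Nat,
    pvGood l i = ((pvSplitComma l).drop (13 - i)).all (fun p => p.isEmpty) := by
  induction l with
  | nil =>
    intro i
    by_cases h : i < 13
    · have : 13 - i = (12 - i) + 1 := by omega
      simp [pvGood, pvSplitComma, this]
    · have : 13 - i = 0 := by omega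
      simp [pvGood, pvSplitComma, this]
  | cons c r ih =>
    intro i
    by_cases hc : c = ','
    · subst hc
      by_cases h : i < 13
      · have h13 : 13 - i = (13 - (i + 1)) + 1 := by omega
        simp [pvGood, pvSplitComma, h13, ih]
      · have h1 : 13 - i = 0 := by omega
        have h2 : 13 - (i + 1) = 0 := by omega
        simp [pvGood, pvSplitComma, h1, h2, ih]
    · rcases h : pvSplitComma r with _ | ⟨p, ps⟩
      · exact absurd h (pvSplitComma_ne_nil r)
      · by_cases hle : i ≤ 12
        · have h13 : 13 - i = (12 - i) + 1 := by omega
          have lhs : pvGood (c :: r) i = pvGood r i := by simp [pvGood, hc, hle]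
          have rhs : pvSplitComma (c :: r) = (c :: p) :: ps := by simp [pvSplitComma, hc, h]
          rw [lhs, rhs, ih i, h, h13]
          simp
        · have h1 : 13 - i = 0 := by omega
          simp [pvGood, pvSplitComma, hc, h, hle, h1]

-- main loop correspondence
theorem pv_main (l : List Char) : ∀ (i : Nat) (d : PySem.Dict String String),
    pvGood l i = true →
    (l.foldl pvStepA (d, (i : Int))).1
      = (List.zip ("ABCDEFGHIJKLM".toList.drop i) (pvSplitComma l)).foldl pvInnerB d := by
  induction l with
  | nil =>
    intro i d _
    cases h : "ABCDEFGHIJKLM".toList.drop i with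
    | nil => simp [pvSplitComma, h]
    | cons x xs => simp [pvSplitComma, h, pvInnerB]
  | cons c r ih =>
    intro i d hg
    by_cases hc : c = ','
    · subst hc
      have hg' : pvGood r (i + 1) = true := by simpa [pvGood] using hg
      have hstep : pvStepA (d, (i : Int)) ',' = (d, ((i + 1 : Nat) : Int)) := by
        simp [pvStepA]
      rw [List.foldl_cons, hstep, ih (i + 1) d hg']
      rw [show pvSplitComma (',' :: r) = [] :: pvSplitComma r from by simp [pvSplitComma]]
      cases h : "ABCDEFGHIJKLM".toList.drop i with
      | nil =>
        have h1 : "ABCDEFGHIJKLM".toList.drop (i + 1) = [] := by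
          apply List.drop_eq_nil_of_le
          have := List.drop_eq_nil_iff.mp h
          omega
        rw [h1]; rfl
      | cons x xs =>
        have hxs : "ABCDEFGHIJKLM".toList.drop (i + 1) = xs := by
          have := List.drop_drop (i := 1) (j := i) (l := "ABCDEFGHIJKLM".toList)
          rw [h] at this
          simpa [Nat.add_comm] using this.symm
        rw [hxs, List.zip_cons_cons, List.foldl_cons,
            show pvInnerB d (x, []) = d from rfl]
    · have hle : i ≤ 12 := by
        by_contra hle
        simp [pvGood, hc, hle] at hg
      have hg' : pvGood r i = true := by
        simp [pvGood, hc] at hg; exact hg.2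
      have hlt : i < ("ABCDEFGHIJKLM".toList).length := by simp; omega
      have hdrop := List.drop_eq_getElem_cons hlt
      have hget : PySem.Str.pyGet? "ABCDEFGHIJKLM" (i : Int)
          = some (("ABCDEFGHIJKLM".toList)[i]) := by
        unfold PySem.Str.pyGet?
        rw [PySem.Chars.pyGet?_eq_listPyGet?, PySem.List.pyGet?_natCast]
        exact List.getElem?_eq_getElem hlt
      have hstep : pvStepA (d, (i : Int)) c
          = (d.insert (String.mk [c]) (String.mk [("ABCDEFGHIJKLM".toList)[i]]), (i : Int)) := by
        simp only [pvStepA, if_neg hc, hget]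
      rw [List.foldl_cons, hstep, ih i _ hg']
      rcases h : pvSplitComma r with _ | ⟨p, ps⟩
      · exact absurd h (pvSplitComma_ne_nil r)
      · rw [show pvSplitComma (c :: r) = (c :: p) :: ps from by simp [pvSplitComma, hc, h],
            hdrop, List.zip_cons_cons, List.zip_cons_cons, List.foldl_cons, List.foldl_cons]
        rfl

-- ===== VERDICT (by name: the statement is the Claim_ definition above) =====
theorem parse_chanmodes_spec : Claim_equal_parse_chanmodes := by
  intro chanmodes _ hpre
  unfold Spec_parse_chanmodes parse_chanmodes parse_chanmodes_alt
  rw [pv_splitOn_comma]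
  congr 1
  apply pv_main chanmodes.toList 0 (PySem.Dict.mk [])
  rw [pvGood_iff]
  unfold Pre_parse_chanmodes at hpre
  rw [pv_splitOn_comma] at hpre
  simpa using hpre
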